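-- pv_equiv track=rewrite | github.com/huguesrichard/AOC24 | Puzzle-day2.py | n_sign_change
-- ===== SOURCE A (Python) =====
-- from collections import defaultdict
--
-- def n_sign_change(ldir):
--     """
--     Computes the number of sign changes in a
--     list of True, False
--     """
--     d = defaultdict(int)
--     for x in ldir:
--         d[x] += 1
--     if len(d) == 1:
--         return 0
--     else:
--         return min(d.values())
-- ===== SOURCE B (Python) =====
-- def n_sign_change(ldir):
--     """
--     Computes the number of sign changes in a
--     list of True, False
--     """
--     t = 0
--     for x in ldir:
--         if x:
--             t += 1
--     f = len(ldir) - t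
--     if t == 0 or f == 0:
--         return 0
--     return t if t < f else f
-- ===== Notes on version B (the rewrite author's own statement) =====
-- stated objective: simpler
-- what changed: Replaces the defaultdict counting pass plus min over dict values with a single integer counter of True elements and arithmetic (False count = len - count), no dictionary at all.
import Mathlib
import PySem

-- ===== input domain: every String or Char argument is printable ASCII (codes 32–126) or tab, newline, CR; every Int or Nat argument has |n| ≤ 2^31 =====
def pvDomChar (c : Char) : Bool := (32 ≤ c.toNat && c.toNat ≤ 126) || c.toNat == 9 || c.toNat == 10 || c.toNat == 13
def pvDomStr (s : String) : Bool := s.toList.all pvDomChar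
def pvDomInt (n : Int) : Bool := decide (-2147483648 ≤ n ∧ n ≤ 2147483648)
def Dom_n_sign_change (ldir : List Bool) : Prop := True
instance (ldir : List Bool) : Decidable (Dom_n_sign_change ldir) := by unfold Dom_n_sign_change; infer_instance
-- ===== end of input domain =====

-- B replaces A's defaultdict-count + min over dict values by a single integer counter
-- of True elements and arithmetic; objective: simpler, no dictionary.

-- ===== PORT A =====
-- d = defaultdict(int); for x in ldir: d[x] += 1; then len(d)==1 -> 0 else min(d.values()).
-- min over an empty values list raises ValueError in Python (only for ldir = []): the port
-- yields .getD 0 there and Pre_ excludes the empty list.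
def n_sign_change (ldir : List Bool) : Int :=
  let d := ldir.foldl (fun d x => d.modify x 0 (· + 1)) (PySem.Dict.empty : PySem.Dict Bool Int)
  if d.size = 1 then 0
  else (PySem.List.min? d.values (fun v => v)).getD 0

-- ===== PORT B =====
def n_sign_change_alt (ldir : List Bool) : Int :=
  let t := ldir.foldl (fun t x => if x then t + 1 else t) (0 : Int)
  let f := (ldir.length : Int) - t
  if t = 0 ∨ f = 0 then 0
  else if t < f then t else f

-- ===== PRECONDITION & SPEC =====
-- Pre_ excludes only the empty list, on which A raises ValueError (min of empty sequence).
def Pre_n_sign_change (ldir : List Bool) : Prop := ldir ≠ []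
instance (ldir : List Bool) : Decidable (Pre_n_sign_change ldir) := by unfold Pre_n_sign_change; infer_instance
def pvWitness_n_sign_change : List Bool := [true, false, true]

def Spec_n_sign_change (ldir : List Bool) (out : Int) : Prop := out = n_sign_change_alt ldir
instance (ldir : List Bool) (out : Int) : Decidable (Spec_n_sign_change ldir out) := by unfold Spec_n_sign_change; infer_instance

-- ===== CLAIM (what is proved, stated in full; the proofs are below) =====
def Claim_equal_n_sign_change : Prop := ∀ (ldir : List Bool), Dom_n_sign_change ldir → Pre_n_sign_change ldir → Spec_n_sign_change ldir (n_sign_change ldir)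

-- ===== LEMMAS AND PROOFS =====

-- B's loop counts the True elements.
lemma foldl_count_true (l : List Bool) (a : Int) :
    l.foldl (fun t x => if x then t + 1 else t) a = a + l.count true := by
  induction l generalizing a with
  | nil => simp
  | cons x xs ih =>
    cases x <;> simp [List.foldl, ih] <;> ring

-- counts of true and false add up to the length
lemma count_true_add_count_false (l : List Bool) :
    l.count true + l.count false = l.length := by
  induction l with
  | nil => simp
  | cons x xs ih => cases x <;> (simp; omega)

-- a Nodup list of Bools is one of five lists
lemma bool_nodup_cases (l : List Bool) (h : l.Nodup) :
    l = [] ∨ l = [true] ∨ l = [false] ∨ l = [true, false] ∨ l = [false, true] := by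
  match l with
  | [] => simp
  | [a] => cases a <;> simp
  | a :: b :: rest =>
    cases a <;> cases b <;> simp_all <;>
    · match rest with
      | [] => rfl
      | c :: _ => cases c <;> simp_all

lemma mem_of_ofList_eq {α : Type} [DecidableEq α] (l : List α) (s : List α)
    (h : PySem.Set.ofList l = s) (x : α) (hx : x ∈ s) : x ∈ l := by
  subst h; exact (PySem.Set.mem_ofList l x).mp hx

lemma not_mem_of_ofList_eq {α : Type} [DecidableEq α] (l : List α) (s : List α)
    (h : PySem.Set.ofList l = s) (x : α) (hx : x ∉ s) : x ∉ l := by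
  subst h; exact fun hm => hx ((PySem.Set.mem_ofList l x).mpr hm)

-- ===== VERDICT (by name: the statement is the Claim_ definition above) =====
theorem n_sign_change_spec : Claim_equal_n_sign_change := by
  intro ldir _ hpre
  unfold Spec_n_sign_change n_sign_change n_sign_change_alt
  have hfold : ldir.foldl (fun d x => d.modify x 0 (· + 1)) (PySem.Dict.empty : PySem.Dict Bool Int)
      = PySem.Dict.counter ldir := (PySem.Dict.counter_eq_foldl ldir).symm
  rw [hfold]
  have hitems := PySem.Dict.items_counter ldir
  have hnodup := PySem.Set.nodup_ofList ldir
  have ht : ldir.foldl (fun t x => if x then t + 1 else t) (0 : Int) = (ldir.count true : Int) := by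
    rw [foldl_count_true]; omega
  have hsum := count_true_add_count_false ldir
  rcases bool_nodup_cases _ hnodup with h5 | h5 | h5 | h5 | h5
  · -- ofList = [] → ldir = []
    exact absurd (List.eq_nil_iff_forall_not_mem.mpr
      (fun x => not_mem_of_ofList_eq ldir [] h5 x (by simp))) hpre
  · -- only true
    have hf : ldir.count false = 0 :=
      List.count_eq_zero.mpr (not_mem_of_ofList_eq ldir [true] h5 false (by simp))
    simp only [PySem.Dict.size, PySem.Dict.values, hitems, h5, List.map, List.length]
    rw [ht]
    have h0 : (ldir.length : Int) - (ldir.count true : Int) = 0 := by omega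
    simp only [List.length_cons, h0, or_true, if_true]
  · -- only false
    have hf : ldir.count true = 0 :=
      List.count_eq_zero.mpr (not_mem_of_ofList_eq ldir [false] h5 true (by simp))
    simp only [PySem.Dict.size, PySem.Dict.values, hitems, h5, List.map, List.length]
    rw [ht]
    have h0 : (ldir.count true : Int) = 0 := by omega
    simp only [List.length_cons, h0, true_or, if_true]
  · -- true first, both present
    have htp : 0 < ldir.count true :=
      List.count_pos_iff.mpr (mem_of_ofList_eq ldir [true, false] h5 true (by simp))
    have hfp : 0 < ldir.count false :=
      List.count_pos_iff.mpr (mem_of_ofList_eq ldir [true, false] h5 false (by simp))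
    simp only [PySem.Dict.size, PySem.Dict.values, hitems, h5, List.map, List.length]
    rw [ht]
    simp only [PySem.List.min?, List.foldl]
    split_ifs <;> (try simp only [Option.getD_some]) <;> omega
  · -- false first, both present
    have htp : 0 < ldir.count true :=
      List.count_pos_iff.mpr (mem_of_ofList_eq ldir [false, true] h5 true (by simp))
    have hfp : 0 < ldir.count false :=
      List.count_pos_iff.mpr (mem_of_ofList_eq ldir [false, true] h5 false (by simp))
    simp only [PySem.Dict.size, PySem.Dict.values, hitems, h5, List.map, List.length]
    rw [ht]
    simp only [PySem.List.min?, List.foldl]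
    split_ifs <;> (try simp only [Option.getD_some]) <;> omega
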